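-- pv_equiv track=rewrite | github.com/akashmathew18/MINI-PROJECT-III | script_analysis/script_analyzer.py | _enhance_summary_narrative
-- ===== SOURCE A (Python) =====
-- def _enhance_summary_narrative(summary: str) -> str:
--     """Enhance abstractive summary to be more narrative-focused."""
--     if not summary:
--         return summary
--
--     # Add narrative elements to make it more story-focused
--     enhanced = summary
--
--     # Replace generic terms with more specific narrative language
--     replacements = {
--         'characters': 'protagonists',
--         'story': 'narrative',
--         'events': 'plot developments',
--         'situation': 'dramatic situation',
--         'conflict': 'central conflict',
--         'resolution': 'climactic resolution'
--     }
--
--     for generic, specific in replacements.items():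
--         enhanced = enhanced.replace(generic, specific)
--
--     return enhanced
-- ===== SOURCE B (Python) =====
-- def _enhance_summary_narrative(summary: str) -> str:
--     """Enhance abstractive summary to be more narrative-focused.
--
--     Streams the text through six fused replacement stages in one traversal,
--     instead of building six intermediate full strings.
--     """
--     replacements = {
--         'characters': 'protagonists',
--         'story': 'narrative',
--         'events': 'plot developments',
--         'situation': 'dramatic situation',
--         'conflict': 'central conflict',
--         'resolution': 'climactic resolution'
--     }
--
--     def stage(source, old, new):
--         buf = ''
--         for ch in source:
--             buf += ch
--             while buf and not old.startswith(buf):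
--                 yield buf[0]
--                 buf = buf[1:]
--             if buf == old:
--                 yield from new
--                 buf = ''
--         yield from buf
--
--     stream = iter(summary)
--     for generic, specific in replacements.items():
--         stream = stage(stream, generic, specific)
--     return ''.join(stream)
-- ===== Notes on version B (the rewrite author's own statement) =====
-- stated objective: alternative
-- what changed: B streams the text through six fused buffer-automaton replacement stages in a single traversal (no intermediate full strings), instead of A's six sequential whole-string replace passes.
import Mathlib
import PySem

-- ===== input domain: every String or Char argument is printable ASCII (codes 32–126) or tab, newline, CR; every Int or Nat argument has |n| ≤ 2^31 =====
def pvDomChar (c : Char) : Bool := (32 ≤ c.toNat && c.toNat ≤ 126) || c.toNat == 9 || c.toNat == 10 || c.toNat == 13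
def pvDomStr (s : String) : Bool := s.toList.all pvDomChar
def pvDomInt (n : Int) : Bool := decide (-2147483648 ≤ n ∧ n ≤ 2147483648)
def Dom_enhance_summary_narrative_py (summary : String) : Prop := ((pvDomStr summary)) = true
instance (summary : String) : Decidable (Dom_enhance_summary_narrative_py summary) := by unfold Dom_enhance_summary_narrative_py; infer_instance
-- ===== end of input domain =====

-- B streams the text through six fused replacement stages in one traversal instead of
-- A's six sequential whole-string replace passes; the return values are proved equal.

-- ===== PORT A =====
def enhance_summary_narrative_py (summary : String) : String :=
  if summary = "" then summary
  else
    List.foldl (fun enhanced p => PySem.Str.replace enhanced p.1 p.2) summary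
      [("characters", "protagonists"), ("story", "narrative"),
       ("events", "plot developments"), ("situation", "dramatic situation"),
       ("conflict", "central conflict"), ("resolution", "climactic resolution")]

-- ===== PORT B =====
-- the inner `while buf and not old.startswith(buf)` loop of Source B's stage:
-- pops chars off the front of the buffer until it is a prefix of `old`,
-- returning (chars emitted, buffer kept)
def pvAdjust (old : List Char) : List Char → List Char × List Char
  | [] => ([], [])
  | c :: rest =>
    if (c :: rest).isPrefixOf old then ([], c :: rest)
    else (c :: (pvAdjust old rest).1, (pvAdjust old rest).2)

-- one generator stage of Source B: feed `src` through, threading the buffer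
def pvStage (old new : List Char) : List Char → List Char → List Char
  | buf, [] => buf
  | buf, ch :: src =>
      if (pvAdjust old (buf ++ [ch])).2 = old then
        (pvAdjust old (buf ++ [ch])).1 ++ new ++ pvStage old new [] src
      else
        (pvAdjust old (buf ++ [ch])).1 ++ pvStage old new (pvAdjust old (buf ++ [ch])).2 src

def enhance_summary_narrative_py_alt (summary : String) : String :=
  String.ofList
    (List.foldl (fun stream p => pvStage p.1.toList p.2.toList [] stream) summary.toList
      [("characters", "protagonists"), ("story", "narrative"),
       ("events", "plot developments"), ("situation", "dramatic situation"),
       ("conflict", "central conflict"), ("resolution", "climactic resolution")])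

-- ===== PRECONDITION & SPEC =====
def Spec_enhance_summary_narrative_py (summary : String) (out : String) : Prop :=
  out = enhance_summary_narrative_py_alt summary
instance (summary : String) (out : String) : Decidable (Spec_enhance_summary_narrative_py summary out) := by
  unfold Spec_enhance_summary_narrative_py; infer_instance

-- ===== CLAIM (what is proved, stated in full; the proofs are below) =====
def Claim_equal_enhance_summary_narrative_py : Prop :=
  ∀ (summary : String), Dom_enhance_summary_narrative_py summary →
    Spec_enhance_summary_narrative_py summary (enhance_summary_narrative_py summary)

-- ===== LEMMAS AND PROOFS =====

-- clean recursion equivalent to Python str.replace for a nonempty pattern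
def pvRep (k v : List Char) : List Char → List Char
  | [] => []
  | c :: cs =>
    if k.isPrefixOf (c :: cs) then v ++ pvRep k v (cs.drop (k.length - 1))
    else c :: pvRep k v cs
termination_by l => l.length
decreasing_by all_goals (simp [List.length_drop]; try omega)

theorem pvGo_eq (k v : List Char) (hk : k ≠ []) :
    ∀ (fuel : Nat) (l acc : List Char), l.length ≤ fuel →
      PySem.Chars.replace.go k v fuel l acc = acc.reverse ++ pvRep k v l := by
  intro fuel
  induction fuel with
  | zero =>
      intro l acc h
      have hl : l = [] := by cases l <;> simp_all
      subst hl
      rw [PySem.Chars.replace.go.eq_def]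
      simp [pvRep]
  | succ n ih =>
      intro l acc h
      cases l with
      | nil =>
          rw [PySem.Chars.replace.go.eq_def]
          simp [pvRep]
      | cons c cs =>
          rw [PySem.Chars.replace.go.eq_def]
          by_cases hp : k.isPrefixOf (c :: cs)
          · simp only [hp, if_true]
            have hkl : 1 ≤ k.length := by
              cases k with
              | nil => exact absurd rfl hk
              | cons a as => simp
            have hdrop : List.drop k.length (c :: cs) = cs.drop (k.length - 1) := by
              cases k with
              | nil => exact absurd rfl hk
              | cons a as => simp
            rw [hdrop, ih _ _ (by simp at h ⊢; omega)]
            simp [pvRep, hp]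
          · simp only [hp]
            rw [ih cs (c :: acc) (by simp at h ⊢; omega)]
            simp [pvRep, hp]

theorem pvReplace_eq (l k v : List Char) (hk : k ≠ []) :
    PySem.Chars.replace l k v = pvRep k v l := by
  unfold PySem.Chars.replace
  have : k.isEmpty = false := by cases k <;> simp_all
  rw [this]
  simpa using pvGo_eq k v hk l.length l [] le_rfl

theorem pvRep_nil (k v : List Char) : pvRep k v [] = [] := by simp [pvRep]

theorem pvRep_cons_neg {k : List Char} (v : List Char) {c : Char} {cs : List Char}
    (h : ¬ k <+: (c :: cs)) : pvRep k v (c :: cs) = c :: pvRep k v cs := by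
  rw [pvRep]
  rw [if_neg (by simpa [List.isPrefixOf_iff_prefix] using h)]

theorem pvRep_fire {k : List Char} (v : List Char) (hk : k ≠ []) (b : List Char) :
    pvRep k v (k ++ b) = v ++ pvRep k v b := by
  cases k with
  | nil => exact absurd rfl hk
  | cons a as =>
      rw [List.cons_append, pvRep]
      rw [if_pos (by simp [List.isPrefixOf_iff_prefix, List.prefix_append])]
      simp

theorem pvRep_short (k v : List Char) : ∀ b, b.length < k.length → pvRep k v b = b := by
  intro b
  induction b with
  | nil => intro _; exact pvRep_nil k v
  | cons c cs ih =>
      intro h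
      have hnp : ¬ k <+: (c :: cs) := fun hp => by
        have := hp.length_le
        simp at this h
        omega
      rw [pvRep_cons_neg v hnp, ih (by simp at h ⊢; omega)]

theorem pvPrefixSplit {p x y : List Char} (h : p <+: x ++ y) :
    p <+: x ∨ (x <+: p ∧ p.drop x.length <+: y) := by
  rcases List.prefix_or_prefix_of_prefix h (List.prefix_append x y) with h1 | h1
  · exact Or.inl h1
  · right
    refine ⟨h1, ?_⟩
    obtain ⟨t, rfl⟩ := h1
    rw [List.drop_left]
    exact (List.prefix_append_right_inj x).mp h

theorem pvRep_skip (k v : List Char) :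
    ∀ (a b : List Char), (∀ j, j < a.length → ¬ k <+: (a.drop j ++ b)) →
      pvRep k v (a ++ b) = a ++ pvRep k v b := by
  intro a
  induction a with
  | nil => intro b _; simp
  | cons c a' ih =>
      intro b h
      have h0 : ¬ k <+: (c :: (a' ++ b)) := by simpa using h 0 (by simp)
      rw [List.cons_append, pvRep_cons_neg v h0,
        ih b (fun j hj => by simpa using h (j + 1) (by simp; omega))]
      simp

theorem pvAdjust_spec (old : List Char) :
    ∀ b, (pvAdjust old b).1 ++ (pvAdjust old b).2 = b ∧ (pvAdjust old b).2 <+: old ∧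
      (∀ j, j < (pvAdjust old b).1.length → ¬ (b.drop j) <+: old) := by
  intro b
  induction b with
  | nil =>
      rw [pvAdjust]
      simp
  | cons c rest ih =>
      by_cases hp : (c :: rest).isPrefixOf old
      · rw [pvAdjust, if_pos hp]
        exact ⟨rfl, List.isPrefixOf_iff_prefix.mp hp, by simp⟩
      · rw [pvAdjust, if_neg hp]
        refine ⟨by simpa using ih.1, ih.2.1, ?_⟩
        intro j hj
        cases j with
        | zero =>
            simpa using fun hpre => hp (List.isPrefixOf_iff_prefix.mpr hpre)
        | succ j' =>
            simp only [List.drop_succ_cons]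
            exact ih.2.2 j' (by simpa using hj)

theorem pvStage_eq (old new : List Char) (hold : old ≠ []) :
    ∀ (src buf : List Char), buf <+: old → buf ≠ old →
      pvStage old new buf src = pvRep old new (buf ++ src) := by
  intro src
  induction src with
  | nil =>
      intro buf hpre hne
      have hlt : buf.length < old.length := by
        rcases Nat.lt_or_ge buf.length old.length with h | h
        · exact h
        · exact absurd (hpre.eq_of_length_le h) hne
      rw [pvStage, List.append_nil, pvRep_short old new buf hlt]
  | cons ch rest ih =>
      intro buf hpre hne
      obtain ⟨hsum, hkept, hemit⟩ := pvAdjust_spec old (buf ++ [ch])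
      have hlt : buf.length < old.length := by
        rcases Nat.lt_or_ge buf.length old.length with h | h
        · exact h
        · exact absurd (hpre.eq_of_length_le h) hne
      have hblen : (buf ++ [ch]).length ≤ old.length := by
        have : (buf ++ [ch]).length = buf.length + 1 := by simp
        omega
      -- no occurrence of `old` starts inside the emitted part
      have hskip : ∀ j, j < (pvAdjust old (buf ++ [ch])).1.length →
          ¬ old <+: (((pvAdjust old (buf ++ [ch])).1.drop j) ++ ((pvAdjust old (buf ++ [ch])).2 ++ rest)) := by
        intro j hj hocc
        have hdropj : ((buf ++ [ch]).drop j) = (pvAdjust old (buf ++ [ch])).1.drop j ++ (pvAdjust old (buf ++ [ch])).2 := by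
          conv_lhs => rw [← hsum]
          rw [List.drop_append_of_le_length (le_of_lt hj)]
        rw [← List.append_assoc, ← hdropj] at hocc
        rcases pvPrefixSplit hocc with hL | ⟨hR, _⟩
        · have hlen2 : ((buf ++ [ch]).drop j).length ≤ old.length := by
            have : ((buf ++ [ch]).drop j).length = (buf ++ [ch]).length - j := by simp
            omega
          have heq : old = (buf ++ [ch]).drop j := hL.eq_of_length_le hlen2
          exact hemit j hj (by rw [← heq])
        · exact hemit j hj hR
      have hrepsplit : pvRep old new (buf ++ ch :: rest) =
          (pvAdjust old (buf ++ [ch])).1 ++ pvRep old new ((pvAdjust old (buf ++ [ch])).2 ++ rest) := by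
        have hre : buf ++ ch :: rest = (pvAdjust old (buf ++ [ch])).1 ++ ((pvAdjust old (buf ++ [ch])).2 ++ rest) := by
          rw [← List.append_assoc, hsum]
          simp
        rw [hre]
        exact pvRep_skip old new _ _ hskip
      rw [pvStage, hrepsplit]
      by_cases hfull : (pvAdjust old (buf ++ [ch])).2 = old
      · rw [if_pos hfull, hfull, pvRep_fire new hold rest,
          ih [] (List.nil_prefix) (fun h => hold h.symm)]
        simp
      · rw [if_neg hfull, ih (pvAdjust old (buf ++ [ch])).2 hkept hfull]

-- A's foldl of PySem.Str.replace, at the character-list level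
theorem pvA_toList (s : String) (hs : ¬ s = "") :
    (enhance_summary_narrative_py s).toList =
      pvRep "resolution".toList "climactic resolution".toList
        (pvRep "conflict".toList "central conflict".toList
          (pvRep "situation".toList "dramatic situation".toList
            (pvRep "events".toList "plot developments".toList
              (pvRep "story".toList "narrative".toList
                (pvRep "characters".toList "protagonists".toList s.toList))))) := by
  simp only [enhance_summary_narrative_py, if_neg hs, List.foldl_cons, List.foldl_nil]
  simp only [PySem.Str.toList_replace]
  rw [pvReplace_eq _ _ _ (by decide), pvReplace_eq _ _ _ (by decide),
      pvReplace_eq _ _ _ (by decide), pvReplace_eq _ _ _ (by decide),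
      pvReplace_eq _ _ _ (by decide), pvReplace_eq _ _ _ (by decide)]

-- B's foldl of stages, at the character-list level
theorem pvB_toList (s : String) :
    (enhance_summary_narrative_py_alt s).toList =
      pvStage "resolution".toList "climactic resolution".toList []
        (pvStage "conflict".toList "central conflict".toList []
          (pvStage "situation".toList "dramatic situation".toList []
            (pvStage "events".toList "plot developments".toList []
              (pvStage "story".toList "narrative".toList []
                (pvStage "characters".toList "protagonists".toList [] s.toList))))) := by
  simp only [enhance_summary_narrative_py_alt, List.foldl_cons, List.foldl_nil,
    String.toList_ofList]

-- ===== VERDICT (by name: the statement is the Claim_ definition above) =====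
theorem enhance_summary_narrative_py_spec : Claim_equal_enhance_summary_narrative_py := by
  intro s _hdom
  unfold Spec_enhance_summary_narrative_py
  by_cases hs : s = ""
  · subst hs
    apply String.toList_inj.mp
    rw [pvB_toList, show enhance_summary_narrative_py "" = "" from by
      simp [enhance_summary_narrative_py]]
    rw [show ("" : String).toList = [] from by decide]
    rw [pvStage_eq _ _ (by decide) [] [] (List.nil_prefix) (by decide),
        pvStage_eq _ _ (by decide) _ [] (List.nil_prefix) (by decide),
        pvStage_eq _ _ (by decide) _ [] (List.nil_prefix) (by decide),
        pvStage_eq _ _ (by decide) _ [] (List.nil_prefix) (by decide),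
        pvStage_eq _ _ (by decide) _ [] (List.nil_prefix) (by decide),
        pvStage_eq _ _ (by decide) _ [] (List.nil_prefix) (by decide)]
    simp [pvRep_nil]
  · apply String.toList_inj.mp
    rw [pvA_toList s hs, pvB_toList]
    rw [pvStage_eq _ _ (by decide) _ [] (List.nil_prefix) (by decide),
        pvStage_eq _ _ (by decide) _ [] (List.nil_prefix) (by decide),
        pvStage_eq _ _ (by decide) _ [] (List.nil_prefix) (by decide),
        pvStage_eq _ _ (by decide) _ [] (List.nil_prefix) (by decide),
        pvStage_eq _ _ (by decide) _ [] (List.nil_prefix) (by decide),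
        pvStage_eq _ _ (by decide) _ [] (List.nil_prefix) (by decide)]
    simp
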